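-- pv_equiv track=rewrite | github.com/Captain525/LanguageFall | manipulateText.py | findNextOccurence
-- ===== SOURCE A (Python) =====
-- def findNextOccurence(character, string, startingIndex, otherChar):
--     if startingIndex == len(string)-1:
--         return -1
--
--     for i in range (startingIndex+1, len(string)):
--         if string[i] == character:
--             return i
--         elif string[i] == otherChar:
--             return -1
--     return -1
-- ===== SOURCE B (Python) =====
-- def findNextOccurence(character, string, startingIndex, otherChar):
--     indices = range(startingIndex + 1, len(string))
--     i = next((p for p in indices if string[p] == character), None)
--     if i is None:
--         return -1
--     j = next((p for p in indices if string[p] == otherChar), None)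
--     if j is not None and j < i:
--         return -1
--     return i
-- ===== Notes on version B (the rewrite author's own statement) =====
-- stated objective: alternative
-- what changed: A's single scan with two early returns (match/blocker) is replaced by two independent first-occurrence searches over the same index range whose positions are compared afterwards.
import Mathlib
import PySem

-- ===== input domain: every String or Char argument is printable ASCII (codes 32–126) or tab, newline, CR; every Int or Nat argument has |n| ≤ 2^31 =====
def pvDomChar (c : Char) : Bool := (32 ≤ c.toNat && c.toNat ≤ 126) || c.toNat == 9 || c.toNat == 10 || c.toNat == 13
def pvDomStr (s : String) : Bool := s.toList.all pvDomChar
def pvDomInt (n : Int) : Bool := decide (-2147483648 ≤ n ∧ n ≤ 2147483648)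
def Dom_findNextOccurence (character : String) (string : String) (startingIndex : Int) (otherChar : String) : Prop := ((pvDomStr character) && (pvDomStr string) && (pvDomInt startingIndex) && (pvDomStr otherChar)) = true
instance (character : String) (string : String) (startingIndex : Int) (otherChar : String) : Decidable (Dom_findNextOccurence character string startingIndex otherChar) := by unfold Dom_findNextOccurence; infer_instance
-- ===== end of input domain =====

-- B replaces A's single scan with two early returns by two independent first-match searches over the
-- same index range, compared afterwards (alternative decomposition, same return value on Pre_).

-- ===== PORT A =====
-- the for-loop with its two early returns, as structural recursion over the range list
def findNextOccurence.loop (character : String) (string : String) (otherChar : String) : List Int → Int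
  | [] => -1
  | i :: rest =>
    match PySem.Str.pyGet? string i with
    | none => -1   -- Python raises IndexError here; Pre_ excludes these inputs
    | some ch =>
      if String.ofList [ch] = character then i
      else if String.ofList [ch] = otherChar then -1
      else findNextOccurence.loop character string otherChar rest

def findNextOccurence (character : String) (string : String) (startingIndex : Int) (otherChar : String) : Int :=
  if startingIndex = PySem.Str.len string - 1 then -1
  else findNextOccurence.loop character string otherChar
        (PySem.List.pyRange (startingIndex + 1) (PySem.Str.len string))

-- ===== PORT B =====
-- next((p for p in indices if string[p] == target), None)
def findNextOccurence_alt.search (target : String) (string : String) : List Int → Option Int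
  | [] => none
  | p :: rest =>
    match PySem.Str.pyGet? string p with
    | none => none   -- Python raises IndexError here; Pre_ excludes these inputs
    | some ch =>
      if String.ofList [ch] = target then some p
      else findNextOccurence_alt.search target string rest

def findNextOccurence_alt (character : String) (string : String) (startingIndex : Int) (otherChar : String) : Int :=
  let indices := PySem.List.pyRange (startingIndex + 1) (PySem.Str.len string)
  match findNextOccurence_alt.search character string indices with
  | none => -1
  | some i =>
    match findNextOccurence_alt.search otherChar string indices with
    | none => i
    | some j => if j < i then -1 else i

-- ===== PRECONDITION & SPEC =====
-- Pre_ excludes exactly the inputs where Python A raises IndexError: a startingIndex so negative that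
-- the scan's first index startingIndex+1 is below -len(string).
def Pre_findNextOccurence (character : String) (string : String) (startingIndex : Int) (otherChar : String) : Prop :=
  -(PySem.Str.len string) ≤ startingIndex + 1
instance (character : String) (string : String) (startingIndex : Int) (otherChar : String) : Decidable (Pre_findNextOccurence character string startingIndex otherChar) := by unfold Pre_findNextOccurence; infer_instance

def pvWitness_findNextOccurence : String × String × Int × String := ("a", "xbay", 0, "b")

def Spec_findNextOccurence (character : String) (string : String) (startingIndex : Int) (otherChar : String) (out : Int) : Prop := out = findNextOccurence_alt character string startingIndex otherChar
instance (character : String) (string : String) (startingIndex : Int) (otherChar : String) (out : Int) : Decidable (Spec_findNextOccurence character string startingIndex otherChar out) := by unfold Spec_findNextOccurence; infer_instance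

-- ===== CLAIM (what is proved, stated in full; the proofs are below) =====
def Claim_equal_findNextOccurence : Prop := ∀ (character : String) (string : String) (startingIndex : Int) (otherChar : String), Dom_findNextOccurence character string startingIndex otherChar → Pre_findNextOccurence character string startingIndex otherChar → Spec_findNextOccurence character string startingIndex otherChar (findNextOccurence character string startingIndex otherChar)

-- ===== LEMMAS AND PROOFS =====

-- B's search only returns members of the index list
theorem pv_search_mem (target string : String) (L : List Int) (j : Int)
    (h : findNextOccurence_alt.search target string L = some j) : j ∈ L := by
  induction L with
  | nil => simp [findNextOccurence_alt.search] at h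
  | cons p rest ih =>
    simp only [findNextOccurence_alt.search] at h
    cases hg : PySem.Str.pyGet? string p with
    | none => rw [hg] at h; simp at h
    | some ch =>
      rw [hg] at h
      by_cases he : String.ofList [ch] = target
      · simp only [he, if_pos rfl] at h
        simp at h; simp [h]
      · simp only [if_neg he] at h
        exact List.mem_cons_of_mem _ (ih h)

-- any step-1 pyRange is strictly increasing
theorem pv_pyRange_pairwise (a b : Int) : List.Pairwise (· < ·) (PySem.List.pyRange a b) := by
  simp only [PySem.List.pyRange, if_neg (one_ne_zero : (1:Int) ≠ 0)]
  rw [List.pairwise_map]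
  exact List.pairwise_lt_range.imp (by intro i j hij; omega)

-- a Python index in [-len, len) is valid
theorem pv_pyGet?_isSome (s : String) (i : Int)
    (h1 : -(PySem.Str.len s) ≤ i) (h2 : i < PySem.Str.len s) :
    (PySem.Str.pyGet? s i).isSome = true := by
  rw [PySem.Str.len_eq] at h1 h2
  rw [PySem.Str.pyGet?_eq, PySem.Chars.pyGet?]
  simp only [PySem.List.pyGet?, PySem.List.pyIdx?]
  by_cases h3 : 0 ≤ i
  · rw [if_pos h3, if_pos h2]
    have hlt : i.toNat < s.toList.length := by omega
    simp only [Option.bind_some]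
    rw [List.getElem?_eq_getElem hlt]
    rfl
  · rw [if_neg h3, if_pos h1]
    have hlt : s.toList.length - (-i).toNat < s.toList.length := by omega
    simp only [Option.bind_some]
    rw [List.getElem?_eq_getElem hlt]
    rfl

-- the heart: on a strictly increasing list of valid indices, A's blocked scan agrees with
-- B's search-both-then-compare
theorem pv_loop_eq (character string otherChar : String) (L : List Int)
    (hinc : List.Pairwise (· < ·) L)
    (hval : ∀ p ∈ L, (PySem.Str.pyGet? string p).isSome = true) :
    findNextOccurence.loop character string otherChar L =
      (match findNextOccurence_alt.search character string L with
       | none => -1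
       | some i =>
         match findNextOccurence_alt.search otherChar string L with
         | none => i
         | some j => if j < i then -1 else i) := by
  induction L with
  | nil => simp [findNextOccurence.loop, findNextOccurence_alt.search]
  | cons p rest ih =>
    obtain ⟨ch, hg⟩ := Option.isSome_iff_exists.mp (hval p (List.mem_cons_self))
    have hrest : ∀ q ∈ rest, (PySem.Str.pyGet? string q).isSome = true :=
      fun q hq => hval q (List.mem_cons_of_mem _ hq)
    have hlt : ∀ q ∈ rest, p < q := fun q hq => (List.pairwise_cons.mp hinc).1 q hq
    simp only [findNextOccurence.loop, findNextOccurence_alt.search, hg]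
    by_cases hc : String.ofList [ch] = character
    · -- character found at p: A returns p
      rw [if_pos hc, if_pos hc]
      by_cases ho : String.ofList [ch] = otherChar
      · rw [if_pos ho]
        exact ((if_neg (lt_irrefl p)).symm : p = if p < p then (-1:Int) else p)
      · rw [if_neg ho]
        cases hso : findNextOccurence_alt.search otherChar string rest with
        | none => rfl
        | some j =>
          have hpj : p < j := hlt j (pv_search_mem _ _ _ _ hso)
          exact ((if_neg (not_lt_of_gt hpj)).symm : p = if j < p then (-1:Int) else p)
    · rw [if_neg hc, if_neg hc]
      by_cases ho : String.ofList [ch] = otherChar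
      · -- blocked at p: A returns -1
        rw [if_pos ho, if_pos ho]
        cases hsc : findNextOccurence_alt.search character string rest with
        | none => rfl
        | some i =>
          have hpi : p < i := hlt i (pv_search_mem _ _ _ _ hsc)
          exact ((if_pos hpi).symm : (-1:Int) = if p < i then (-1:Int) else i)
      · -- neither: both sides step to the tail
        rw [if_neg ho, if_neg ho]
        exact ih (List.pairwise_cons.mp hinc).2 hrest

-- ===== VERDICT (by name: the statement is the Claim_ definition above) =====
theorem findNextOccurence_spec : Claim_equal_findNextOccurence := by
  intro character string startingIndex otherChar _hdom hpre
  unfold Pre_findNextOccurence at hpre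
  unfold Spec_findNextOccurence findNextOccurence findNextOccurence_alt
  by_cases hguard : startingIndex = PySem.Str.len string - 1
  · -- A's guard: the range is then empty, so B's searches both come up empty as well
    have hr : PySem.List.pyRange (startingIndex + 1) (PySem.Str.len string) = [] := by
      have h1 : startingIndex + 1 = PySem.Str.len string := by omega
      rw [h1]
      simp [PySem.List.pyRange]
    rw [if_pos hguard, hr]
    simp [findNextOccurence_alt.search]
  · rw [if_neg hguard]
    exact pv_loop_eq character string otherChar _
      (pv_pyRange_pairwise _ _)
      (fun p hp => by
        obtain ⟨hp1, hp2⟩ := PySem.List.mem_pyRange_one.mp hp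
        exact pv_pyGet?_isSome string p (le_trans hpre hp1) hp2)
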